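-- pv_equiv track=rewrite | github.com/iamcoderisk/sendbaba | backups/pre_restore_20251114_010226/app/services/reply_catcher.py | clean_reply_text
-- ===== SOURCE A (Python) =====
-- def clean_reply_text(text):
--     """Remove quoted text from reply"""
--     if not text:
--         return ''
--
--     # Remove common reply markers
--     lines = text.split('\n')
--     clean_lines = []
--
--     for line in lines:
--         # Stop at common quote markers
--         if any(marker in line for marker in ['On ', 'From:', '>', '-----Original Message-----']):
--             break
--         clean_lines.append(line)
--
--     return '\n'.join(clean_lines).strip()
-- ===== SOURCE B (Python) =====
-- def clean_reply_text(text):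
--     """Remove quoted text from reply"""
--     if not text:
--         return ''
--
--     markers = ['On ', 'From:', '>', '-----Original Message-----']
--     # One global scan: earliest occurrence of any marker in the whole text.
--     positions = [p for p in (text.find(m) for m in markers) if p != -1]
--     if not positions:
--         return text.strip()
--
--     # Cut at the start of the line containing the earliest marker occurrence.
--     head = text[:min(positions)]
--     start = head.rfind('\n') + 1
--     return head[:start].strip()
-- ===== Notes on version B (the rewrite author's own statement) =====
-- stated objective: alternative
-- what changed: A splits the text into lines and loops over them accumulating clean lines until one contains a quote marker; B instead does one global scan of the whole text (minimum str.find position over the markers), locates the start of that marker's line with a reverse newline search, and slices the text there before stripping.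
import Mathlib
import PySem

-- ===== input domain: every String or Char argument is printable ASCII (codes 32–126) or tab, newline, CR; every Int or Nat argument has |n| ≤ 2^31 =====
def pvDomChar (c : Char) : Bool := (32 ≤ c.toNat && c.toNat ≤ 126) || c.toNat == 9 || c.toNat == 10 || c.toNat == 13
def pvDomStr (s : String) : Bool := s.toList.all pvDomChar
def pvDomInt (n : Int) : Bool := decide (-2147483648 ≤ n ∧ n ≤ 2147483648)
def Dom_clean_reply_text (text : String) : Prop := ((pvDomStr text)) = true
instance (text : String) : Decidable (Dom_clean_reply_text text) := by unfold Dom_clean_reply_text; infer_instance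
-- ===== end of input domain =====

-- B replaces A's split-into-lines loop by one global scan: the minimal str.find position of any
-- marker over the whole text, then a reverse newline search to cut at that line's start (objective: alternative).

-- the quote markers, shared verbatim by both ports
def pvMarkers : List (List Char) := ["On ".toList, "From:".toList, ">".toList, "-----Original Message-----".toList]

-- ===== PORT A =====
-- any(marker in line for marker in [...])
def pvAnyMarker (line : List Char) : Bool := pvMarkers.any (fun m => PySem.Chars.isIn m line)

-- the for-loop with break, accumulating clean_lines
def pvLoopA : List (List Char) → List (List Char) → List (List Char)
  | [], acc => acc
  | l :: ls, acc => if pvAnyMarker l then acc else pvLoopA ls (acc ++ [l])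

def clean_reply_text (text : String) : String :=
  if text = "" then ""
  else
    let lines := PySem.Chars.splitOn text.toList ['\n']
    let clean_lines := pvLoopA lines []
    String.ofList (PySem.Chars.strip (PySem.Chars.join ['\n'] clean_lines))

-- ===== PORT B =====
-- positions = [p for p in (text.find(m) for m in markers) if p != -1]
def pvPositions (s : List Char) : List Int :=
  (pvMarkers.map (fun m => PySem.Chars.find s m)).filter (fun p => decide (p ≠ -1))

def clean_reply_text_alt (text : String) : String :=
  if text = "" then ""
  else
    let s := text.toList
    match PySem.List.min? (pvPositions s) (fun p => p) with
    | none => String.ofList (PySem.Chars.strip s)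
    | some pos =>
        let head := PySem.Chars.slice s none (some pos)
        let start := PySem.Chars.rfind head ['\n'] + 1
        String.ofList (PySem.Chars.strip (PySem.Chars.slice head none (some start)))

-- ===== PRECONDITION & SPEC =====
def Spec_clean_reply_text (text : String) (out : String) : Prop := out = clean_reply_text_alt text
instance (text : String) (out : String) : Decidable (Spec_clean_reply_text text out) := by unfold Spec_clean_reply_text; infer_instance

-- ===== CLAIM (what is proved, stated in full; the proofs are below) =====
def Claim_equal_clean_reply_text : Prop := ∀ (text : String), Dom_clean_reply_text text → Spec_clean_reply_text text (clean_reply_text text)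

-- ===== LEMMAS AND PROOFS =====

-- takeWhile-style view of A's loop
def pvTakeClean : List (List Char) → List (List Char)
  | [] => []
  | l :: ls => if pvAnyMarker l then [] else l :: pvTakeClean ls

theorem pvLoopA_eq (ls acc : List (List Char)) : pvLoopA ls acc = acc ++ pvTakeClean ls := by
  induction ls generalizing acc with
  | nil => simp [pvLoopA, pvTakeClean]
  | cons l t ih =>
    simp only [pvLoopA, pvTakeClean]
    by_cases h : pvAnyMarker l <;> simp [h, ih]

-- a functional model of PySem.Chars.splitOn s ['\n']
def pvSplit (pre : List Char) : List Char → List (List Char)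
  | [] => [pre]
  | c :: r => if c = '\n' then pre :: pvSplit [] r else pvSplit (pre ++ [c]) r

theorem pvSplit_go (fuel : Nat) : ∀ (l cur : List Char) (acc : List (List Char)), l.length < fuel →
    PySem.Chars.splitOn.go ['\n'] fuel l cur acc = acc.reverse ++ pvSplit cur.reverse l := by
  induction fuel with
  | zero => intro l cur acc h; omega
  | succ fuel ih =>
    intro l cur acc h
    cases l with
    | nil => simp [PySem.Chars.splitOn.go, pvSplit]
    | cons c rest =>
      by_cases hc : c = '\n'
      · subst hc
        rw [show PySem.Chars.splitOn.go ['\n'] (fuel+1) ('\n' :: rest) cur acc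
              = PySem.Chars.splitOn.go ['\n'] fuel rest [] (cur.reverse :: acc) by
            simp [PySem.Chars.splitOn.go, List.isPrefixOf]]
        rw [ih rest [] (cur.reverse :: acc) (by simpa using Nat.lt_of_succ_lt_succ h)]
        simp [pvSplit]
      · rw [show PySem.Chars.splitOn.go ['\n'] (fuel+1) (c :: rest) cur acc
              = PySem.Chars.splitOn.go ['\n'] fuel rest (c :: cur) acc by
            simp only [PySem.Chars.splitOn.go, List.isPrefixOf, Bool.and_eq_true, beq_iff_eq]
            rw [if_neg]
            intro h
            exact hc h.1.symm]
        rw [ih rest (c :: cur) acc (by simpa using Nat.lt_of_succ_lt_succ h)]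
        simp [pvSplit, hc]

theorem pvSplitOn_eq (s : List Char) : PySem.Chars.splitOn s ['\n'] = pvSplit [] s := by
  rw [PySem.Chars.splitOn, pvSplit_go (s.length + 1) s [] [] (by omega)]
  simp

theorem pvSplit_ne_nil (pre l : List Char) : pvSplit pre l ≠ [] := by
  induction l generalizing pre with
  | nil => simp [pvSplit]
  | cons c r ih => by_cases hc : c = '\n' <;> simp [pvSplit, hc, ih]

theorem pvJoin_pvSplit (l : List Char) : ∀ pre, PySem.Chars.join ['\n'] (pvSplit pre l) = pre ++ l := by
  induction l with
  | nil => intro pre; simp [pvSplit, PySem.Chars.join_singleton]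
  | cons c r ih =>
    intro pre
    obtain ⟨h, t, ht⟩ : ∃ h t, pvSplit ([] : List Char) r = h :: t := by
      cases hs : pvSplit ([] : List Char) r with
      | nil => exact absurd hs (pvSplit_ne_nil _ _)
      | cons h t => exact ⟨h, t, rfl⟩
    by_cases hc : c = '\n'
    · subst hc
      have hrw : pvSplit pre ('\n' :: r) = pre :: h :: t := by simp [pvSplit, ht]
      rw [hrw, PySem.Chars.join_cons_cons, ← ht, ih]
      simp
    · have hrw : pvSplit pre (c :: r) = pvSplit (pre ++ [c]) r := by simp [pvSplit, hc]
      rw [hrw, ih]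
      simp

theorem pvSplit_clean (l : List Char) : ∀ pre, ('\n' ∉ pre) → ∀ p ∈ pvSplit pre l, '\n' ∉ p := by
  induction l with
  | nil => intro pre hp p hm; simp [pvSplit] at hm; subst hm; exact hp
  | cons c r ih =>
    intro pre hp p hm
    by_cases hc : c = '\n'
    · subst hc
      simp only [pvSplit, if_pos] at hm
      rcases List.mem_cons.mp hm with rfl | hm
      · exact hp
      · exact ih [] (by simp) p hm
    · simp only [pvSplit, if_neg hc] at hm
      refine ih (pre ++ [c]) ?_ p hm
      intro hmem
      rcases List.mem_append.mp hmem with h1 | h1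
      · exact hp h1
      · exact hc (List.mem_singleton.mp h1).symm


-- ## prefix / occurrence toolkit

theorem pvPrefix_append_left {sub l t : List Char} {i : Nat} (h : i + sub.length ≤ l.length) :
    sub <+: (l ++ t).drop i ↔ sub <+: l.drop i := by
  rw [List.drop_append_of_le_length (by omega)]
  constructor
  · intro hp
    rw [List.prefix_iff_eq_take] at hp
    rw [List.take_append_of_le_length (by simp; omega)] at hp
    exact List.prefix_iff_eq_take.mpr hp
  · intro hp
    exact hp.trans (List.prefix_append _ _)

theorem pvNo_straddle {sub l t : List Char} {i : Nat} (hn : '\n' ∉ sub)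
    (h : sub <+: (l ++ '\n' :: t).drop i) : i + sub.length ≤ l.length ∨ l.length + 1 ≤ i := by
  by_contra hcon
  push_neg at hcon
  obtain ⟨h1, h2⟩ := hcon
  have hi : i ≤ l.length := by omega
  have hj : l.length - i < sub.length := by omega
  have hlen : l.length < (l ++ '\n' :: t).length := by simp
  have hdl : (List.drop i (l ++ '\n' :: t)).length = (l ++ '\n' :: t).length - i := by simp
  have hb : l.length - i < (List.drop i (l ++ '\n' :: t)).length := by simp; omega
  have he : sub[l.length - i]'hj = (List.drop i (l ++ '\n' :: t))[l.length - i]'hb :=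
    h.getElem hj
  rw [List.getElem_drop] at he
  have hll : i + (l.length - i) = l.length := by omega
  have he2 : (l ++ '\n' :: t)[i + (l.length - i)]'(by omega) = '\n' := by
    simp only [hll]
    rw [List.getElem_append_right (by omega)]
    simp
  rw [he2] at he
  exact hn (he ▸ List.getElem_mem hj)

theorem pvFind_eq_of {s sub : List Char} {k : Nat} (hocc : sub <+: s.drop k)
    (hmin : ∀ i < k, ¬ sub <+: s.drop i) : PySem.Chars.find s sub = (k : Int) := by
  have hin : PySem.Chars.isIn sub s = true :=
    (PySem.Chars.exists_prefix_drop_iff_isIn sub s).mp ⟨k, hocc⟩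
  have hnn : 0 ≤ PySem.Chars.find s sub :=
    (PySem.Chars.find_nonneg_iff s sub).mpr ((PySem.Chars.isIn_iff_infix sub s).mp hin)
  obtain ⟨hoccf, hminf⟩ := PySem.Chars.find_spec hnn
  have h1 : ¬ (PySem.Chars.find s sub).toNat < k := fun hlt => hmin _ hlt hoccf
  have h2 : ¬ k < (PySem.Chars.find s sub).toNat := fun hlt => hminf _ hlt hocc
  have : (PySem.Chars.find s sub).toNat = k := by omega
  omega

-- F0: a marker inside l is found before l's end
theorem pvFind_lt_of_isIn {l m : List Char} (hin : PySem.Chars.isIn m l = true) (hne : m ≠ []) :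
    0 ≤ PySem.Chars.find l m ∧ PySem.Chars.find l m < (l.length : Int) := by
  have hnn : 0 ≤ PySem.Chars.find l m :=
    (PySem.Chars.find_nonneg_iff l m).mpr ((PySem.Chars.isIn_iff_infix m l).mp hin)
  obtain ⟨hocc, _⟩ := PySem.Chars.find_spec hnn
  have hlen : m.length ≤ (List.drop (PySem.Chars.find l m).toNat l).length := hocc.length_le
  have hm : 0 < m.length := List.length_pos_iff.mpr hne
  simp only [List.length_drop] at hlen
  omega

-- F1: a marker inside l is found inside l also in l ++ t
theorem pvFind_append_lt {l t m : List Char} (hin : PySem.Chars.isIn m l = true) (hne : m ≠ []) :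
    0 ≤ PySem.Chars.find (l ++ t) m ∧ PySem.Chars.find (l ++ t) m < (l.length : Int) := by
  have h0 := pvFind_lt_of_isIn hin hne
  have hnn : 0 ≤ PySem.Chars.find l m := h0.1
  obtain ⟨hocc, _⟩ := PySem.Chars.find_spec hnn
  have hlen : m.length ≤ (List.drop (PySem.Chars.find l m).toNat l).length := hocc.length_le
  simp only [List.length_drop] at hlen
  have hocc2 : m <+: (l ++ t).drop (PySem.Chars.find l m).toNat :=
    (pvPrefix_append_left (by omega)).mpr hocc
  have hin2 : PySem.Chars.isIn m (l ++ t) = true :=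
    (PySem.Chars.exists_prefix_drop_iff_isIn m (l ++ t)).mp ⟨_, hocc2⟩
  have hnn2 : 0 ≤ PySem.Chars.find (l ++ t) m :=
    (PySem.Chars.find_nonneg_iff _ m).mpr ((PySem.Chars.isIn_iff_infix m _).mp hin2)
  obtain ⟨_, hminf⟩ := PySem.Chars.find_spec hnn2
  have : ¬ (PySem.Chars.find l m).toNat < (PySem.Chars.find (l ++ t) m).toNat :=
    fun hlt => hminf _ hlt hocc2
  refine ⟨hnn2, ?_⟩
  omega

-- F2: with no occurrence in the first line, find shifts past the separator
theorem pvFind_offset {l t m : List Char} (hne : m ≠ []) (hnl : '\n' ∉ m)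
    (hnotl : PySem.Chars.isIn m l = false) :
    PySem.Chars.find (l ++ '\n' :: t) m =
      if PySem.Chars.isIn m t = true then (l.length : Int) + 1 + PySem.Chars.find t m else -1 := by
  have hnol : ∀ i, ¬ m <+: l.drop i := by
    intro i hocc
    have : PySem.Chars.isIn m l = true := (PySem.Chars.exists_prefix_drop_iff_isIn m l).mp ⟨i, hocc⟩
    simp [this] at hnotl
  have hOccIff : ∀ j : Nat, m <+: (l ++ '\n' :: t).drop (l.length + 1 + j) ↔ m <+: t.drop j := by
    intro j
    have heq : l ++ '\n' :: t = (l ++ ['\n']) ++ t := by simp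
    rw [heq, show l.length + 1 + j = (l ++ ['\n']).length + j by simp, List.drop_append]
    rw [List.drop_eq_nil_of_le (by simp)]
    simp
  by_cases hint : PySem.Chars.isIn m t = true
  · have hnn : 0 ≤ PySem.Chars.find t m :=
      (PySem.Chars.find_nonneg_iff t m).mpr ((PySem.Chars.isIn_iff_infix m t).mp hint)
    obtain ⟨hocc, hmin⟩ := PySem.Chars.find_spec hnn
    set k := (PySem.Chars.find t m).toNat with hk
    have hocc2 : m <+: (l ++ '\n' :: t).drop (l.length + 1 + k) := (hOccIff k).mpr hocc
    have hmin2 : ∀ i < l.length + 1 + k, ¬ m <+: (l ++ '\n' :: t).drop i := by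
      intro i hi hocc3
      rcases pvNo_straddle hnl hocc3 with hcase | hcase
      · exact hnol i ((pvPrefix_append_left hcase).mp hocc3)
      · have hj : i = l.length + 1 + (i - l.length - 1) := by omega
        rw [hj] at hocc3
        have := (hOccIff (i - l.length - 1)).mp hocc3
        exact hmin _ (by omega) this
    rw [pvFind_eq_of hocc2 hmin2, if_pos hint]
    omega
  · rw [if_neg hint]
    rw [PySem.Chars.find_eq_neg_one_iff]
    intro hinf
    obtain ⟨j, hocc⟩ := (PySem.Chars.exists_prefix_drop_iff_isIn m _).mpr
      ((PySem.Chars.isIn_iff_infix m _).mpr hinf)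
    rcases pvNo_straddle hnl hocc with hcase | hcase
    · exact hnol j ((pvPrefix_append_left hcase).mp hocc)
    · have hj : j = l.length + 1 + (j - l.length - 1) := by omega
      rw [hj] at hocc
      have := (hOccIff (j - l.length - 1)).mp hocc
      have : PySem.Chars.isIn m t = true :=
        (PySem.Chars.exists_prefix_drop_iff_isIn m t).mp ⟨_, this⟩
      simp [this] at hint

-- ## rfind toolkit (sub = ['\n'] only)

theorem pvRfind_go_cases (s sub : List Char) (n : Nat) :
    (PySem.Chars.rfind.go s sub n = -1 ∧ ∀ j ≤ n, ¬ sub <+: s.drop j) ∨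
    (∃ k : Nat, PySem.Chars.rfind.go s sub n = (k : Int) ∧ k ≤ n ∧ sub <+: s.drop k ∧
      ∀ j, k < j → j ≤ n → ¬ sub <+: s.drop j) := by
  induction n with
  | zero =>
    by_cases h : sub.isPrefixOf s = true
    · right
      exact ⟨0, by simp [PySem.Chars.rfind.go, h], by omega,
        by simpa using List.isPrefixOf_iff_prefix.mp h, by omega⟩
    · left
      refine ⟨by simp [PySem.Chars.rfind.go, h], ?_⟩
      intro j hj
      interval_cases j
      simpa using fun hp => h (List.isPrefixOf_iff_prefix.mpr hp)
  | succ n ih =>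
    by_cases h : sub.isPrefixOf (s.drop (n + 1)) = true
    · right
      refine ⟨n + 1, by simp [PySem.Chars.rfind.go, h], by omega,
        List.isPrefixOf_iff_prefix.mp h, by omega⟩
    · have hstep : PySem.Chars.rfind.go s sub (n + 1) = PySem.Chars.rfind.go s sub n := by
        simp [PySem.Chars.rfind.go, h]
      have hno : ¬ sub <+: s.drop (n + 1) := fun hp => h (List.isPrefixOf_iff_prefix.mpr hp)
      rcases ih with ⟨he, hall⟩ | ⟨k, he, hk, hocc, hmax⟩
      · left
        refine ⟨hstep ▸ he, ?_⟩
        intro j hj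
        rcases Nat.lt_or_ge j (n + 1) with hlt | hge
        · exact hall j (by omega)
        · have : j = n + 1 := by omega
          exact this ▸ hno
      · right
        refine ⟨k, hstep ▸ he, by omega, hocc, ?_⟩
        intro j hjk hj
        rcases Nat.lt_or_ge j (n + 1) with hlt | hge
        · exact hmax j hjk (by omega)
        · have : j = n + 1 := by omega
          exact this ▸ hno

theorem pvNeg_one_le_rfind (s sub : List Char) : -1 ≤ PySem.Chars.rfind s sub := by
  rcases pvRfind_go_cases s sub s.length with ⟨he, _⟩ | ⟨k, he, _, _, _⟩ <;>
    simp [PySem.Chars.rfind, he] <;> omega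

theorem pvRfind_eq_of {s sub : List Char} {k : Nat} (hk : k ≤ s.length) (hocc : sub <+: s.drop k)
    (hmax : ∀ j, k < j → j ≤ s.length → ¬ sub <+: s.drop j) : PySem.Chars.rfind s sub = (k : Int) := by
  rcases pvRfind_go_cases s sub s.length with ⟨_, hall⟩ | ⟨k', he, hk', hocc', hmax'⟩
  · exact absurd hocc (hall k hk)
  · have h1 : ¬ k < k' := fun h => hmax k' h hk' hocc'
    have h2 : ¬ k' < k := fun h => hmax' k h hk hocc
    have : k' = k := by omega
    rw [PySem.Chars.rfind, he, this]

theorem pvRfind_neg {s sub : List Char} (h : ∀ j, j ≤ s.length → ¬ sub <+: s.drop j) :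
    PySem.Chars.rfind s sub = -1 := by
  rcases pvRfind_go_cases s sub s.length with ⟨he, _⟩ | ⟨k, he, hk, hocc, _⟩
  · rw [PySem.Chars.rfind, he]
  · exact absurd hocc (h k hk)

theorem pvSingle_prefix_iff (c : Char) (xs : List Char) : [c] <+: xs ↔ xs.head? = some c := by
  cases xs with
  | nil => simp
  | cons a t =>
    simp only [List.head?_cons, Option.some_inj]
    constructor
    · intro h
      have h2 := List.prefix_iff_eq_take.mp h
      simp at h2
      exact h2.symm
    · rintro rfl
      exact ⟨t, rfl⟩

theorem pvRfind_not_mem {c : Char} {s : List Char} (h : c ∉ s) :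
    PySem.Chars.rfind s [c] = -1 := by
  refine pvRfind_neg ?_
  intro j _ hp
  rw [pvSingle_prefix_iff] at hp
  have : c ∈ List.drop j s := by
    cases hd : List.drop j s with
    | nil => simp [hd] at hp
    | cons a t => simp [hd] at hp; simp [hd, hp]
  exact h (List.mem_of_mem_drop this)

-- R1: rfind '\n' past a '\n'-free first line shifts by l.length + 1
theorem pvRfind_offset {l t : List Char} (hl : '\n' ∉ l) :
    PySem.Chars.rfind (l ++ '\n' :: t) ['\n'] = (l.length : Int) + 1 + PySem.Chars.rfind t ['\n'] := by
  have hOccIff : ∀ j : Nat, ['\n'] <+: (l ++ '\n' :: t).drop (l.length + 1 + j) ↔ ['\n'] <+: t.drop j := by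
    intro j
    have heq : l ++ '\n' :: t = (l ++ ['\n']) ++ t := by simp
    rw [heq, show l.length + 1 + j = (l ++ ['\n']).length + j by simp, List.drop_append]
    rw [List.drop_eq_nil_of_le (by simp)]
    simp
  have hlen : (l ++ '\n' :: t).length = l.length + 1 + t.length := by simp; omega
  rcases pvRfind_go_cases t ['\n'] t.length with ⟨he, hall⟩ | ⟨k, he, hk, hocc, hmax⟩
  · have hrt : PySem.Chars.rfind t ['\n'] = -1 := by rw [PySem.Chars.rfind, he]
    have hocc0 : ['\n'] <+: (l ++ '\n' :: t).drop l.length := by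
      rw [List.drop_append_of_le_length (by omega), List.drop_of_length_le (by omega)]
      exact ⟨t, by simp⟩
    have : PySem.Chars.rfind (l ++ '\n' :: t) ['\n'] = (l.length : Int) := by
      refine pvRfind_eq_of (by omega) hocc0 ?_
      intro j hjl hjlen hp
      have hj : j = l.length + 1 + (j - l.length - 1) := by omega
      rw [hj] at hp
      exact hall _ (by omega) ((hOccIff _).mp hp)
    rw [this, hrt]
    omega
  · have hrt : PySem.Chars.rfind t ['\n'] = (k : Int) := by rw [PySem.Chars.rfind, he]
    have : PySem.Chars.rfind (l ++ '\n' :: t) ['\n'] = ((l.length + 1 + k : Nat) : Int) := by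
      refine pvRfind_eq_of (by omega) ((hOccIff k).mpr hocc) ?_
      intro j hjk hjlen hp
      have hj : j = l.length + 1 + (j - l.length - 1) := by omega
      rw [hj] at hp
      exact hmax _ (by omega) (by omega) ((hOccIff _).mp hp)
    rw [this, hrt]
    push_cast
    ring

-- ## marker / positions toolkit

theorem pvMarkers_facts : ∀ m ∈ pvMarkers, m ≠ [] ∧ '\n' ∉ m := by decide

theorem pvAnyMarker_false_iff (l : List Char) :
    pvAnyMarker l = false ↔ ∀ m ∈ pvMarkers, PySem.Chars.isIn m l = false := by
  simp [pvAnyMarker, List.any_eq_false]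

theorem pvPositions_nonneg {s : List Char} {q : Int} (hq : q ∈ pvPositions s) : 0 ≤ q := by
  simp only [pvPositions, List.mem_filter, List.mem_map, decide_eq_true_eq] at hq
  obtain ⟨⟨m, _, rfl⟩, hne⟩ := hq
  have := PySem.Chars.neg_one_le_find s m
  omega

theorem pvPositions_eq_nil {s : List Char}
    (h : ∀ m ∈ pvMarkers, PySem.Chars.isIn m s = false) : pvPositions s = [] := by
  rw [pvPositions, List.filter_eq_nil_iff]
  intro q hq
  simp only [List.mem_map] at hq
  obtain ⟨m, hm, rfl⟩ := hq
  have : PySem.Chars.find s m = -1 := by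
    rw [PySem.Chars.find_eq_neg_one_iff]
    intro hinf
    have htrue : PySem.Chars.isIn m s = true := (PySem.Chars.isIn_iff_infix m s).mpr hinf
    rw [h m hm] at htrue
    exact Bool.false_ne_true htrue
  simp [this]

theorem pvMem_join_infix {l : List Char} {ls : List (List Char)} (h : l ∈ ls) :
    l <:+: PySem.Chars.join ['\n'] ls := by
  induction ls with
  | nil => simp at h
  | cons a rest ih =>
    rcases List.mem_cons.mp h with rfl | hmem
    · cases rest with
      | nil => rw [PySem.Chars.join_singleton]
      | cons b r =>
        rw [PySem.Chars.join_cons_cons]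
        exact ((l.prefix_append _).trans (List.prefix_append _ _)).isInfix
    · cases rest with
      | nil => simp at hmem
      | cons b r =>
        rw [PySem.Chars.join_cons_cons]
        refine (ih hmem).trans ?_
        exact (List.suffix_append _ _).isInfix

theorem pvAll_clean_of_positions_nil {s : List Char} {lines : List (List Char)}
    (hj : PySem.Chars.join ['\n'] lines = s) (hp : pvPositions s = [])
    {l : List Char} (hl : l ∈ lines) : pvAnyMarker l = false := by
  rw [pvAnyMarker_false_iff]
  intro m hm
  by_contra hin
  have hin' : PySem.Chars.isIn m l = true := by
    cases h : PySem.Chars.isIn m l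
    · exact absurd h hin
    · rfl
  have hinf : m <:+: s := by
    rw [← hj]
    exact ((PySem.Chars.isIn_iff_infix m l).mp hin').trans (pvMem_join_infix hl)
  have hfind : 0 ≤ PySem.Chars.find s m := (PySem.Chars.find_nonneg_iff s m).mpr hinf
  have : PySem.Chars.find s m ∈ pvPositions s := by
    simp only [pvPositions, List.mem_filter, List.mem_map, decide_eq_true_eq]
    exact ⟨⟨m, hm, rfl⟩, by omega⟩
  rw [hp] at this
  simp at this

-- positions shift past a clean first line
theorem pvPosGen (l t : List Char) (ms : List (List Char))
    (hms : ∀ m ∈ ms, m ≠ [] ∧ '\n' ∉ m ∧ PySem.Chars.isIn m l = false) :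
    ((ms.map (fun m => PySem.Chars.find (l ++ '\n' :: t) m)).filter (fun p => decide (p ≠ -1)))
      = ((ms.map (fun m => PySem.Chars.find t m)).filter (fun p => decide (p ≠ -1))).map
          (· + ((l.length : Int) + 1)) := by
  induction ms with
  | nil => simp
  | cons m rest ih =>
    obtain ⟨hne, hnl, hnotl⟩ := hms m (by simp)
    have hrest := fun m hm => hms m (List.mem_cons_of_mem _ hm)
    simp only [List.map_cons]
    rw [pvFind_offset hne hnl hnotl]
    by_cases hint : PySem.Chars.isIn m t = true
    · rw [if_pos hint]
      have hnn : 0 ≤ PySem.Chars.find t m :=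
        (PySem.Chars.find_nonneg_iff t m).mpr ((PySem.Chars.isIn_iff_infix m t).mp hint)
      rw [List.filter_cons, List.filter_cons]
      rw [if_pos (by simp; omega), if_pos (by simp; omega)]
      rw [List.map_cons, ih hrest]
      congr 1
      omega
    · have hm1 : PySem.Chars.find t m = -1 := by
        rw [PySem.Chars.find_eq_neg_one_iff]
        intro hinf
        exact hint ((PySem.Chars.isIn_iff_infix m t).mpr hinf)
      rw [if_neg hint, hm1]
      rw [List.filter_cons, List.filter_cons]
      rw [if_neg (by simp), if_neg (by simp)]
      exact ih hrest

theorem pvPositions_offset {l t : List Char} (hl : pvAnyMarker l = false) :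
    pvPositions (l ++ '\n' :: t) = (pvPositions t).map (· + ((l.length : Int) + 1)) := by
  have hms : ∀ m ∈ pvMarkers, m ≠ [] ∧ '\n' ∉ m ∧ PySem.Chars.isIn m l = false := by
    intro m hm
    obtain ⟨h1, h2⟩ := pvMarkers_facts m hm
    exact ⟨h1, h2, (pvAnyMarker_false_iff l).mp hl m hm⟩
  exact pvPosGen l t pvMarkers hms

-- min? commutes with a constant shift
theorem pvFoldl_min_add (c : Int) (t : List Int) : ∀ x,
    List.foldl min (x + c) (t.map (· + c)) = List.foldl min x t + c := by
  induction t with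
  | nil => intro x; simp
  | cons y r ih =>
    intro x
    simp only [List.map_cons, List.foldl_cons]
    rw [show min (x + c) (y + c) = min x y + c from min_add_add_right x y c]
    exact ih _

theorem pvMin_map (xs : List Int) (c : Int) :
    PySem.List.min? (xs.map (· + c)) (fun p => p) =
      (PySem.List.min? xs (fun p => p)).map (· + c) := by
  cases xs with
  | nil =>
    have h := (PySem.List.min?_eq_none_iff ([] : List Int) (fun p : Int => p)).mpr rfl
    simp [h]
  | cons x t =>
    rw [List.map_cons, PySem.List.min?_id_cons, PySem.List.min?_id_cons]
    simp [pvFoldl_min_add c t x]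

-- ## join-with-trailing-newline and strip

def pvJoinT (ts : List (List Char)) : List Char := ts.flatMap (fun l => l ++ ['\n'])

theorem pvJoinT_eq_join {ts : List (List Char)} (h : ts ≠ []) :
    pvJoinT ts = PySem.Chars.join ['\n'] ts ++ ['\n'] := by
  induction ts with
  | nil => simp at h
  | cons a rest ih =>
    cases rest with
    | nil => simp [pvJoinT, PySem.Chars.join_singleton]
    | cons b r =>
      rw [PySem.Chars.join_cons_cons]
      have : pvJoinT (a :: b :: r) = a ++ ['\n'] ++ pvJoinT (b :: r) := by simp [pvJoinT]
      rw [this, ih (by simp)]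
      simp

theorem pvRstrip_append_newline (z : List Char) :
    PySem.Chars.rstrip (z ++ ['\n']) = PySem.Chars.rstrip z := by
  rw [PySem.Chars.rstrip, PySem.Chars.rstrip]
  rw [List.reverse_append]
  simp [List.dropWhile_cons, show PySem.Chars.isspace '\n' = true from by decide]

theorem pvStrip_append_newline (x : List Char) :
    PySem.Chars.strip (x ++ ['\n']) = PySem.Chars.strip x := by
  rw [PySem.Chars.strip, PySem.Chars.strip, PySem.Chars.lstrip, PySem.Chars.lstrip]
  rw [List.dropWhile_append]
  by_cases h : (List.dropWhile PySem.Chars.isspace x).isEmpty = true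
  · rw [if_pos h]
    have hx : List.dropWhile PySem.Chars.isspace x = [] := by simpa using h
    rw [hx]
    simp [List.dropWhile_cons, show PySem.Chars.isspace '\n' = true from by decide,
      PySem.Chars.rstrip]
  · rw [if_neg h]
    exact pvRstrip_append_newline _

theorem pvStrip_joinT (ts : List (List Char)) :
    PySem.Chars.strip (pvJoinT ts) = PySem.Chars.strip (PySem.Chars.join ['\n'] ts) := by
  cases ts with
  | nil => simp [pvJoinT, PySem.Chars.join_nil]
  | cons a rest =>
    rw [pvJoinT_eq_join (by simp)]
    exact pvStrip_append_newline _

theorem pvTakeClean_all {lines : List (List Char)}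
    (h : ∀ l ∈ lines, pvAnyMarker l = false) : pvTakeClean lines = lines := by
  induction lines with
  | nil => rfl
  | cons l ls ih =>
    rw [pvTakeClean, if_neg (by simp [h l (by simp)]), ih (fun x hx => h x (by simp [hx]))]

-- ## the main cut lemma: B's global scan carves exactly A's clean prefix (with trailing '\n's)

theorem pvCut (lines : List (List Char)) (hcl : ∀ l ∈ lines, '\n' ∉ l) (p : Int)
    (hmin : PySem.List.min? (pvPositions (PySem.Chars.join ['\n'] lines)) (fun p => p) = some p) :
    0 ≤ p ∧
    List.take (PySem.Chars.rfind (List.take p.toNat (PySem.Chars.join ['\n'] lines)) ['\n'] + 1).toNat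
        (List.take p.toNat (PySem.Chars.join ['\n'] lines)) = pvJoinT (pvTakeClean lines) := by
  induction lines generalizing p with
  | nil =>
    rw [PySem.Chars.join_nil, show pvPositions [] = [] from by decide] at hmin
    simp [PySem.List.min?] at hmin
  | cons l ls ih =>
    have hp0 : 0 ≤ p := pvPositions_nonneg (PySem.List.min?_mem hmin)
    refine ⟨hp0, ?_⟩
    by_cases hM : pvAnyMarker l = true
    · -- first line carries a marker: the cut is empty
      obtain ⟨m₀, hm₀, hin₀⟩ : ∃ m₀ ∈ pvMarkers, PySem.Chars.isIn m₀ l = true := by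
        simpa [pvAnyMarker, List.any_eq_true] using hM
      have hne₀ : m₀ ≠ [] := (pvMarkers_facts m₀ hm₀).1
      have hbound : 0 ≤ PySem.Chars.find (PySem.Chars.join ['\n'] (l :: ls)) m₀ ∧
          PySem.Chars.find (PySem.Chars.join ['\n'] (l :: ls)) m₀ < (l.length : Int) := by
        cases ls with
        | nil => rw [PySem.Chars.join_singleton]; exact pvFind_lt_of_isIn hin₀ hne₀
        | cons b r =>
          rw [PySem.Chars.join_cons_cons, List.append_assoc]
          exact pvFind_append_lt hin₀ hne₀
      have hmem : PySem.Chars.find (PySem.Chars.join ['\n'] (l :: ls)) m₀ ∈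
          pvPositions (PySem.Chars.join ['\n'] (l :: ls)) := by
        simp only [pvPositions, List.mem_filter, List.mem_map, decide_eq_true_eq]
        exact ⟨⟨m₀, hm₀, rfl⟩, by omega⟩
      have hple : p ≤ PySem.Chars.find (PySem.Chars.join ['\n'] (l :: ls)) m₀ :=
        PySem.List.min?_isMin hmin _ hmem
      have hplt : p.toNat ≤ l.length := by omega
      have htake : List.take p.toNat (PySem.Chars.join ['\n'] (l :: ls)) = List.take p.toNat l := by
        cases ls with
        | nil => rw [PySem.Chars.join_singleton]
        | cons b r =>
          rw [PySem.Chars.join_cons_cons, List.append_assoc]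
          exact List.take_append_of_le_length hplt
      rw [htake]
      have hnem : '\n' ∉ List.take p.toNat l := fun hc => hcl l (by simp) (List.take_subset _ _ hc)
      rw [pvRfind_not_mem hnem]
      simp [pvTakeClean, hM, pvJoinT]
    · -- first line clean: shift everything past it
      have hMf : pvAnyMarker l = false := by
        cases h : pvAnyMarker l
        · rfl
        · exact absurd h hM
      cases ls with
      | nil =>
        rw [PySem.Chars.join_singleton] at hmin
        rw [pvPositions_eq_nil ((pvAnyMarker_false_iff l).mp hMf)] at hmin
        simp [PySem.List.min?] at hmin
      | cons b r =>
        have hJ : PySem.Chars.join ['\n'] (l :: b :: r)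
            = l ++ '\n' :: PySem.Chars.join ['\n'] (b :: r) := by
          rw [PySem.Chars.join_cons_cons, List.append_assoc]
          rfl
        set S' := PySem.Chars.join ['\n'] (b :: r) with hS'
        rw [hJ, pvPositions_offset hMf, pvMin_map] at hmin
        obtain ⟨p', hmin', hpp⟩ : ∃ p', PySem.List.min? (pvPositions S') (fun p => p) = some p' ∧
            p = p' + ((l.length : Int) + 1) := by
          cases hm' : PySem.List.min? (pvPositions S') (fun p => p) with
          | none => rw [hm'] at hmin; simp at hmin
          | some q => rw [hm'] at hmin; exact ⟨q, rfl, by simpa using hmin.symm⟩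
        obtain ⟨hp'0, ihcut⟩ := ih (fun x hx => hcl x (by simp [hx])) p' hmin'
        -- decompose the head slice
        have hsplit : l ++ '\n' :: S' = (l ++ ['\n']) ++ S' := by simp
        have hptn : p.toNat = (l ++ ['\n']).length + p'.toNat := by
          simp only [List.length_append, List.length_cons, List.length_nil]
          omega
        have htake : List.take p.toNat ((l ++ ['\n']) ++ S')
            = (l ++ ['\n']) ++ List.take p'.toNat S' := by
          rw [hptn, List.take_append, List.take_of_length_le (Nat.le_add_right _ _),
            Nat.add_sub_cancel_left]
        rw [hJ, hsplit, htake]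
        have hhead : (l ++ ['\n']) ++ List.take p'.toNat S' = l ++ '\n' :: List.take p'.toNat S' := by
          simp
        rw [hhead, pvRfind_offset (hcl l (by simp))]
        set r' := PySem.Chars.rfind (List.take p'.toNat S') ['\n'] with hr'
        have hr'1 : -1 ≤ r' := pvNeg_one_le_rfind _ _
        have hlap : (l ++ ['\n']).length = l.length + 1 := by simp
        have hsn : ((l.length : Int) + 1 + r' + 1).toNat = (l ++ ['\n']).length + (r' + 1).toNat := by
          rw [hlap]
          omega
        rw [hsn, show l ++ '\n' :: List.take p'.toNat S' = (l ++ ['\n']) ++ List.take p'.toNat S' by simp]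
        rw [List.take_append, List.take_of_length_le (by omega)]
        rw [show (l ++ ['\n']).length + (r' + 1).toNat - (l ++ ['\n']).length = (r' + 1).toNat by omega]
        rw [ihcut]
        rw [show pvTakeClean (l :: b :: r) = if pvAnyMarker l then [] else l :: pvTakeClean (b :: r)
              from rfl,
            if_neg (by simp [hMf])]
        simp [pvJoinT]

-- ===== VERDICT (by name: the statement is the Claim_ definition above) =====
theorem clean_reply_text_spec : Claim_equal_clean_reply_text := by
  intro text _
  unfold Spec_clean_reply_text clean_reply_text clean_reply_text_alt
  by_cases h : text = ""
  · simp [h]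
  · rw [if_neg h, if_neg h]
    simp only []
    have hsplit := pvSplitOn_eq text.toList
    have hJ : PySem.Chars.join ['\n'] (PySem.Chars.splitOn text.toList ['\n']) = text.toList := by
      rw [hsplit]
      simpa using pvJoin_pvSplit text.toList []
    have hcl : ∀ l ∈ PySem.Chars.splitOn text.toList ['\n'], '\n' ∉ l := by
      rw [hsplit]
      exact pvSplit_clean text.toList [] (by simp)
    have hA : pvLoopA (PySem.Chars.splitOn text.toList ['\n']) []
        = pvTakeClean (PySem.Chars.splitOn text.toList ['\n']) := by
      simpa using pvLoopA_eq (PySem.Chars.splitOn text.toList ['\n']) []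
    cases hmin : PySem.List.min? (pvPositions text.toList) (fun p => p) with
    | none =>
      have hpos : pvPositions text.toList = [] := (PySem.List.min?_eq_none_iff _ _).mp hmin
      have hall : ∀ l ∈ PySem.Chars.splitOn text.toList ['\n'], pvAnyMarker l = false :=
        fun l hl => pvAll_clean_of_positions_nil hJ hpos hl
      simp only [hA, pvTakeClean_all hall, hJ]
    | some p =>
      obtain ⟨hp0, hcut⟩ := pvCut (PySem.Chars.splitOn text.toList ['\n']) hcl p
        (by rw [hJ]; exact hmin)
      rw [hJ] at hcut
      have hsl1 : PySem.Chars.slice text.toList none (some p) = List.take p.toNat text.toList := by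
        rw [PySem.Chars.slice_eq_listSlice]
        exact PySem.List.slice_to text.toList hp0
      have hst : 0 ≤ PySem.Chars.rfind (List.take p.toNat text.toList) ['\n'] + 1 := by
        have := pvNeg_one_le_rfind (List.take p.toNat text.toList) ['\n']
        omega
      have hsl2 : PySem.Chars.slice (List.take p.toNat text.toList) none
          (some (PySem.Chars.rfind (List.take p.toNat text.toList) ['\n'] + 1))
          = List.take (PySem.Chars.rfind (List.take p.toNat text.toList) ['\n'] + 1).toNat
              (List.take p.toNat text.toList) := by
        rw [PySem.Chars.slice_eq_listSlice]
        exact PySem.List.slice_to _ hst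
      simp only [hA, hsl1, hsl2, hcut, pvStrip_joinT]
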